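-- pv_equiv track=rewrite | github.com/Handonggon/coding_test | programmers/챌린지/코딩테스트 실전 대비 모의고사(2022)/3차(8.10~8.23)/재윤/2번/code.py | solution
-- ===== SOURCE A (Python) =====
-- def solution(ing):
--     answer = 0
--     cook = []
--     for i in ing:
--         cook.append(i)
--         while len(cook)>=4:
--             a = cook.pop()
--             b = cook.pop()
--             c = cook.pop()
--             d = cook.pop()
--             if a == 1 and b == 3 and c == 2 and d == 1:
--                 answer += 1
--             else:
--                 cook.append(d)
--                 cook.append(c)
--                 cook.append(b)
--                 cook.append(a)
--                 break
--     return answer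
-- ===== SOURCE B (Python) =====
-- def solution(ing):
--     lst = list(ing)
--     answer = 0
--     found = True
--     while found:
--         found = False
--         for j in range(len(lst) - 3):
--             if lst[j:j+4] == [1, 2, 3, 1]:
--                 del lst[j:j+4]
--                 answer += 1
--                 found = True
--                 break
--     return answer
-- ===== Notes on version B (the rewrite author's own statement) =====
-- stated objective: alternative
-- what changed: Replaces the single left-to-right stack pass that collapses pattern suffixes with repeated whole-list scans that delete the leftmost contiguous 1-2-3-1 occurrence until none remains; equivalence rests on leftmost removal commuting with the stack's cascading collapse.
import Mathlib
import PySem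

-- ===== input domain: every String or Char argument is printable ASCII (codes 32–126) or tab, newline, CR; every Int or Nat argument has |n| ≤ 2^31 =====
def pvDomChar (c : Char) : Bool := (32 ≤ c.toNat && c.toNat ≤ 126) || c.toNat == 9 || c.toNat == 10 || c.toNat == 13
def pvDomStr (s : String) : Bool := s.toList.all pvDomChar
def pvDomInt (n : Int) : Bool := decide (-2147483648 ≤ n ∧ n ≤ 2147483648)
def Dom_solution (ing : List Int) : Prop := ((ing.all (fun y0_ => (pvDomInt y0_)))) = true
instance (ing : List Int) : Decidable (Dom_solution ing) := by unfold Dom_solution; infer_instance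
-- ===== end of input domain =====

-- B replaces A's single stack pass by repeated whole-list scans deleting the leftmost
-- contiguous [1,2,3,1]; an alternative decomposition, not faster.


-- ===== PORT A =====
-- Python's `while len(cook)>=4: a=pop();b=pop();c=pop();d=pop(); …` — the four pops from
-- the end are read off cook.reverse; the non-matching branch restores them and breaks.
def whileA (cook : List Int) (answer : Int) : List Int × Int :=
  match h : cook.reverse with
  | a :: b :: c :: d :: _rest =>
      if a = 1 ∧ b = 3 ∧ c = 2 ∧ d = 1 then whileA _rest.reverse (answer + 1)
      else (cook, answer)
  | _ => (cook, answer)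
termination_by cook.length
decreasing_by
  have := congrArg List.length h
  simp at this ⊢
  omega

def solution (ing : List Int) : Int :=
  (ing.foldl (fun st i => whileA (st.1 ++ [i]) st.2) ([], 0)).2

-- ===== PORT B =====
-- `for j in range(len(lst)-3): if lst[j:j+4]==[1,2,3,1]: del lst[j:j+4]; …; break` with the
-- found-flag while loop.  For the natural index j, lst[j:j+4] is (lst.drop j).take 4 and
-- del lst[j:j+4] leaves lst.take j ++ lst.drop (j+4) — exact Python slice semantics here.
def loopB (lst : List Int) (answer : Int) : Int :=
  match h : (List.range (lst.length - 3)).find?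
      (fun j => decide ((lst.drop j).take 4 = [1, 2, 3, 1])) with
  | some j => loopB (lst.take j ++ lst.drop (j + 4)) (answer + 1)
  | none => answer
termination_by lst.length
decreasing_by
  have hj := List.mem_range.mp (List.mem_of_find?_eq_some h)
  simp
  omega

def solution_alt (ing : List Int) : Int := loopB ing 0

-- ===== PRECONDITION & SPEC =====
def Spec_solution (ing : List Int) (out : Int) : Prop := out = solution_alt ing
instance (ing : List Int) (out : Int) : Decidable (Spec_solution ing out) := by unfold Spec_solution; infer_instance

-- ===== CLAIM (what is proved, stated in full; the proofs are below) =====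
def Claim_equal_solution : Prop := ∀ (ing : List Int), Dom_solution ing → Spec_solution ing (solution ing)

-- ===== LEMMAS AND PROOFS =====

/-- One step of A's fold. -/
def stepA (st : List Int × Int) (i : Int) : List Int × Int := whileA (st.1 ++ [i]) st.2

/-- A's fold from an arbitrary state. -/
def runA (st : List Int × Int) (l : List Int) : List Int × Int := l.foldl stepA st

/-- `l` contains a contiguous occurrence of [1,2,3,1]. -/
def Occ (l : List Int) : Prop := ∃ u v, l = u ++ [1, 2, 3, 1] ++ v

theorem whileA_eq (cook : List Int) (n : Int) :
    whileA cook n =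
      match cook.reverse with
      | a :: b :: c :: d :: rest =>
          if a = 1 ∧ b = 3 ∧ c = 2 ∧ d = 1 then whileA rest.reverse (n + 1) else (cook, n)
      | _ => (cook, n) := by
  rw [whileA]
  split
  · next a b c d rest heq => rw [heq]
  · next heq =>
    rcases hc : cook.reverse with _ | ⟨a, _ | ⟨b, _ | ⟨c, _ | ⟨d, rest⟩⟩⟩⟩
    · rfl
    · rfl
    · rfl
    · rfl
    · exact absurd hc (heq a b c d rest)

theorem whileA_no_suffix (cook : List Int) (n : Int)
    (h : ∀ w, cook ≠ w ++ [1, 2, 3, 1]) : whileA cook n = (cook, n) := by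
  rw [whileA_eq]
  rcases hc : cook.reverse with _ | ⟨a, _ | ⟨b, _ | ⟨c, _ | ⟨d, rest⟩⟩⟩⟩ <;> simp only [hc]
  by_cases hm : a = 1 ∧ b = 3 ∧ c = 2 ∧ d = 1
  · exfalso
    obtain ⟨ha, hb, hcc, hd⟩ := hm
    subst ha; subst hb; subst hcc; subst hd
    apply h rest.reverse
    have h2 := congrArg List.reverse hc
    simpa using h2
  · rw [if_neg hm]

theorem whileA_suffix (u : List Int) (n : Int) :
    whileA (u ++ [1, 2, 3, 1]) n = whileA u (n + 1) := by
  rw [whileA_eq]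
  have hrev : (u ++ [1, 2, 3, 1]).reverse = 1 :: 3 :: 2 :: 1 :: u.reverse := by simp
  rw [hrev]
  simp

theorem whileA_shift : ∀ (k : Nat) (cook : List Int), cook.length ≤ k → ∀ n : Int,
    whileA cook n = ((whileA cook 0).1, (whileA cook 0).2 + n) := by
  intro k
  induction k with
  | zero =>
    intro cook hk n
    have : cook = [] := List.eq_nil_of_length_eq_zero (Nat.le_zero.mp hk)
    subst this
    rw [whileA_no_suffix _ _ (by intro w h; simp at h), whileA_no_suffix _ _ (by intro w h; simp at h)]
    simp
  | succ k ih =>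
    intro cook hk n
    rw [whileA_eq cook n, whileA_eq cook 0]
    rcases hc : cook.reverse with _ | ⟨a, _ | ⟨b, _ | ⟨c, _ | ⟨d, rest⟩⟩⟩⟩ <;> simp only [hc]
    · simp
    · simp
    · simp
    · simp
    · have hlen : rest.reverse.length ≤ k := by
        have := congrArg List.length hc
        simp at this
        simp
        omega
      by_cases hm : a = 1 ∧ b = 3 ∧ c = 2 ∧ d = 1
      · rw [if_pos hm, if_pos hm, ih rest.reverse hlen (n + 1), ih rest.reverse hlen (0 + 1)]
        simp only [Prod.mk.injEq]
        exact ⟨trivial, by ring⟩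
      · rw [if_neg hm, if_neg hm]
        simp

theorem runA_shift : ∀ (l : List Int) (s : List Int) (n : Int),
    runA (s, n) l = ((runA (s, 0) l).1, (runA (s, 0) l).2 + n) := by
  intro l
  induction l with
  | nil => intro s n; simp [runA]
  | cons x l ih =>
    intro s n
    have hstep : stepA (s, n) x = ((stepA (s, 0) x).1, (stepA (s, 0) x).2 + n) := by
      simp only [stepA]
      exact whileA_shift (s ++ [x]).length _ (le_refl _) n
    simp only [runA, List.foldl_cons] at *
    rw [hstep, ih ((stepA (s, 0) x).1) ((stepA (s, 0) x).2 + n),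
        ih ((stepA (s, 0) x).1) ((stepA (s, 0) x).2)]
    apply Prod.ext <;> simp <;> ring

theorem occ_append_right (u : List Int) (x : Int) (h : Occ u) : Occ (u ++ [x]) := by
  obtain ⟨a, b, rfl⟩ := h
  exact ⟨a, b ++ [x], by simp⟩

theorem runA_noOcc : ∀ (u : List Int), ¬ Occ u → runA ([], 0) u = (u, 0) := by
  intro u
  induction u using List.reverseRecOn with
  | nil => intro _; simp [runA]
  | append_singleton u x ih =>
    intro hno
    have hu : ¬ Occ u := fun h => hno (occ_append_right u x h)
    have : runA ([], 0) (u ++ [x]) = stepA (runA ([], 0) u) x := by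
      simp [runA, List.foldl_append]
    rw [this, ih hu]
    simp only [stepA]
    rw [whileA_no_suffix]
    intro w hw
    exact hno ⟨w, [], by simpa using hw⟩

theorem key_step (u v : List Int) (hno : ¬ Occ u) (hne : ∀ w, u ≠ w ++ [1, 2, 3]) :
    runA ([], 0) (u ++ [1, 2, 3, 1] ++ v)
      = ((runA ([], 0) (u ++ v)).1, (runA ([], 0) (u ++ v)).2 + 1) := by
  have husuf : ∀ (t : List Int) (n : Int), (∀ w, t ≠ w ++ [1,2,3,1]) → whileA t n = (t, n) :=
    whileA_no_suffix
  have h1 : stepA (u, 0) 1 = (u ++ [1], 0) := by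
    simp only [stepA]
    apply whileA_no_suffix
    intro w hw
    apply hne w
    have := congrArg List.reverse hw
    simp at this
    have := congrArg List.reverse this
    simpa using this
  have h2 : stepA (u ++ [1], 0) 2 = (u ++ [1, 2], 0) := by
    simp only [stepA]
    rw [List.append_assoc]
    apply whileA_no_suffix
    intro w hw
    have := congrArg List.reverse hw
    simp at this
  have h3 : stepA (u ++ [1, 2], 0) 3 = (u ++ [1, 2, 3], 0) := by
    simp only [stepA]
    rw [List.append_assoc]
    apply whileA_no_suffix
    intro w hw
    have := congrArg List.reverse hw
    simp at this
  have h4 : stepA (u ++ [1, 2, 3], 0) 1 = (u, 1) := by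
    simp only [stepA]
    rw [List.append_assoc]
    show whileA (u ++ [1, 2, 3, 1]) 0 = (u, 1)
    rw [whileA_suffix]
    apply whileA_no_suffix
    intro w hw
    exact hno ⟨w, [], by simpa using hw⟩
  have hfold : runA ([], 0) (u ++ [1, 2, 3, 1] ++ v)
      = runA (runA ([], 0) u) ([1, 2, 3, 1] ++ v) := by
    simp [runA, List.append_assoc, List.foldl_append]
  rw [hfold, runA_noOcc u hno]
  have : runA (u, 0) ([1, 2, 3, 1] ++ v) = runA (u, 1) v := by
    show runA (u, 0) (1 :: 2 :: 3 :: 1 :: v) = runA (u, 1) v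
    simp only [runA, List.foldl_cons]
    rw [show stepA (u, 0) 1 = (u ++ [1], 0) from h1, h2, h3, h4]
  rw [this, runA_shift]
  have huv : runA ([], 0) (u ++ v) = runA (u, 0) v := by
    simp [runA, List.foldl_append]
    rw [show List.foldl stepA ([], 0) u = runA ([], 0) u from rfl, runA_noOcc u hno]
  rw [huv]

-- B side ----------------------------------------------------------------

theorem loopB_eq (lst : List Int) (n : Int) :
    loopB lst n =
      match (List.range (lst.length - 3)).find?
          (fun j => decide ((lst.drop j).take 4 = [1, 2, 3, 1])) with
      | some j => loopB (lst.take j ++ lst.drop (j + 4)) (n + 1)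
      | none => n := by
  rw [loopB]
  split
  · next heq => rw [heq]
  · next heq => rw [heq]

theorem find_none_noOcc (lst : List Int)
    (h : (List.range (lst.length - 3)).find?
        (fun j => decide ((lst.drop j).take 4 = [1, 2, 3, 1])) = none) : ¬ Occ lst := by
  rintro ⟨a, b, rfl⟩
  have hlen : (a ++ [1, 2, 3, 1] ++ b).length = a.length + 4 + b.length := by simp; omega
  have hmem : a.length ∈ List.range ((a ++ [1, 2, 3, 1] ++ b).length - 3) := by
    rw [List.mem_range]; omega
  have := List.find?_eq_none.mp h _ hmem
  simp only [decide_eq_true_eq] at this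
  apply this
  rw [List.append_assoc, List.drop_left]
  rfl

theorem find_some_props (lst : List Int) (j : Nat)
    (h : (List.range (lst.length - 3)).find?
        (fun j => decide ((lst.drop j).take 4 = [1, 2, 3, 1])) = some j) :
    lst = lst.take j ++ [1, 2, 3, 1] ++ lst.drop (j + 4)
      ∧ ¬ Occ (lst.take j) ∧ (∀ w, lst.take j ≠ w ++ [1, 2, 3])
      ∧ j + 4 ≤ lst.length := by
  have hmem := List.mem_range.mp (List.mem_of_find?_eq_some h)
  have hpred : (lst.drop j).take 4 = [1, 2, 3, 1] := by
    have := List.find?_some h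
    simpa using this
  have hj4 : j + 4 ≤ lst.length := by omega
  -- minimality: every i < j fails the predicate
  have hmin : ∀ i : Nat, i < j → (lst.drop i).take 4 ≠ [1, 2, 3, 1] := by
    obtain ⟨hp, as, bs, hsplit, hfail⟩ := List.find?_eq_some_iff_append.mp h
    have hlt : as.length < lst.length - 3 := by
      have := congrArg List.length hsplit
      simp at this
      omega
    have hjlen : j = as.length := by
      have h1 : (as ++ j :: bs)[as.length]? = some j := by
        rw [List.getElem?_append_right (le_refl _)]
        simp
      rw [← hsplit, List.getElem?_range hlt] at h1
      exact (Option.some_inj.mp h1).symm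
    have has : as = List.range j := by
      have h1 := congrArg (List.take as.length) hsplit
      rw [List.take_left] at h1
      rw [← h1, List.take_range]
      congr 1
      omega
    intro i hij hpi
    have hias : i ∈ as := by
      rw [has, List.mem_range]
      exact hij
    have := hfail i hias
    simp [hpi] at this
  -- decomposition
  have hdecomp : lst = lst.take j ++ [1, 2, 3, 1] ++ lst.drop (j + 4) := by
    conv_lhs => rw [← List.take_append_drop j lst]
    conv_lhs => rw [← List.take_append_drop 4 (lst.drop j)]
    rw [hpred, List.drop_drop]
    simp [List.append_assoc]
  have htakelen : (lst.take j).length = j := by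
    rw [List.length_take]; omega
  refine ⟨hdecomp, ?_, ?_, hj4⟩
  · rintro ⟨a, b, hab⟩
    have hlen : a.length + 4 + b.length = j := by
      have := congrArg List.length hab
      simp [htakelen] at this
      omega
    apply hmin a.length (by omega)
    have : lst.drop a.length = [1, 2, 3, 1] ++ (b ++ (lst.drop j)) := by
      conv_lhs => rw [← List.take_append_drop j lst, hab]
      rw [List.append_assoc, List.append_assoc, List.drop_left]
    rw [this]
    rfl
  · intro w hw
    have hlen : w.length + 3 = j := by
      have := congrArg List.length hw
      simp [htakelen] at this
      omega
    apply hmin w.length (by omega)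
    have : lst.drop w.length = [1, 2, 3] ++ ([1, 2, 3, 1] ++ lst.drop (j + 4)) := by
      conv_lhs => rw [hdecomp, hw]
      rw [List.append_assoc, List.append_assoc, List.drop_left]
    rw [this]
    rfl

theorem loopB_runA : ∀ (k : Nat) (lst : List Int), lst.length ≤ k → ∀ n : Int,
    loopB lst n = n + (runA ([], 0) lst).2 := by
  intro k
  induction k with
  | zero =>
    intro lst hk n
    have : lst = [] := List.eq_nil_of_length_eq_zero (Nat.le_zero.mp hk)
    subst this
    rw [loopB_eq]
    simp [runA]
  | succ k ih =>
    intro lst hk n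
    rw [loopB_eq]
    rcases hf : (List.range (lst.length - 3)).find?
        (fun j => decide ((lst.drop j).take 4 = [1, 2, 3, 1])) with _ | j
    · rw [runA_noOcc lst (find_none_noOcc lst hf)]
      simp
    · dsimp only
      obtain ⟨hdecomp, hno, hne, hj4⟩ := find_some_props lst j hf
      have hcount : (runA ([], 0) lst).2
          = (runA ([], 0) (lst.take j ++ lst.drop (j + 4))).2 + 1 := by
        conv_lhs => rw [hdecomp]
        rw [key_step _ _ hno hne]
      have hlen : (lst.take j ++ lst.drop (j + 4)).length ≤ k := by
        simp [List.length_take]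
        omega
      rw [ih _ hlen (n + 1), hcount]
      ring

-- ===== VERDICT (by name: the statement is the Claim_ definition above) =====
theorem solution_spec : Claim_equal_solution := by
  intro ing _
  show solution ing = solution_alt ing
  have hA : solution ing = (runA ([], 0) ing).2 := rfl
  have hB : solution_alt ing = loopB ing 0 := rfl
  rw [hA, hB, loopB_runA ing.length ing (le_refl _) 0]
  ring
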